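-- pv_equiv track=rewrite | github.com/SRP190805/.py | first_rec_char.py | first_recursive_char
-- ===== SOURCE A (Python) =====
-- def first_recursive_char(n):
--     s = []
--     k = []
--     for i in n:
--         if i in s:
--             #return i
--             if i not in k:
--                 if i != ' ':
--                   k.append(i)
--         else:
--             s.append(i)
--     return k
-- ===== SOURCE B (Python) =====
-- def first_recursive_char(n):
--     positions = {}
--     for i, ch in enumerate(n):
--         positions.setdefault(ch, []).append(i)
--     seconds = sorted(ps[1] for ch, ps in positions.items()
--                      if ch != ' ' and len(ps) >= 2)
--     return [n[i] for i in seconds]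
-- ===== Notes on version B (the rewrite author's own statement) =====
-- stated objective: alternative
-- what changed: A is one stateful pass that scans two accumulator lists by membership at every character; B is staged: a first pass builds an index of each character's positions, then the second-occurrence positions of non-space characters with at least two occurrences are collected, sorted, and mapped back through the string to produce the output.
import Mathlib
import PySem

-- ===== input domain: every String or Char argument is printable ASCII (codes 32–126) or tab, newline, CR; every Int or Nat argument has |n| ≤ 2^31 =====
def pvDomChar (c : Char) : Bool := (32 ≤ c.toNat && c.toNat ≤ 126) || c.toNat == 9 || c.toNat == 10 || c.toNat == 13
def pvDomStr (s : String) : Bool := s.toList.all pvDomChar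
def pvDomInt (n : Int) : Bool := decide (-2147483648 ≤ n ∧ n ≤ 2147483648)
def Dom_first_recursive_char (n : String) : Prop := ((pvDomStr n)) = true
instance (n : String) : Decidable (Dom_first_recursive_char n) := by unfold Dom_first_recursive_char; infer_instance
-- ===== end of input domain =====

-- B replaces A's single stateful pass (two accumulator lists scanned by membership)
-- by staged passes: build a position index per character, collect the second-
-- occurrence positions of the non-space characters, sort them, and index back into
-- the string (objective: alternative).

-- ===== PORT A =====
-- one loop step of A: s = st.1 (seen chars), k = st.2 (result so far)
def fr_step (st : List Char × List Char) (i : Char) : List Char × List Char :=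
  if i ∈ st.1 then
    if i ∉ st.2 then
      if i ≠ ' ' then (st.1, st.2 ++ [i]) else st
    else st
  else (st.1 ++ [i], st.2)

def first_recursive_char (n : String) : List String :=
  ((n.toList.foldl fr_step ([], [])).2).map (fun c => String.ofList [c])

-- ===== PORT B =====
-- positions.setdefault(ch, []).append(i)  (as a dict transformation: modify with default [])
def frb_posStep (d : PySem.Dict Char (List Int)) (p : Int × Char) : PySem.Dict Char (List Int) :=
  d.modify p.2 [] (· ++ [p.1])

-- Source B's body over the code points; ps[1] is ported as pyGetD (exact: the filter
-- guarantees 2 <= len(ps)) and n[i] as pyGet? (exact: every collected index is in range)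
def frb_core (t : List Char) : List Char :=
  (PySem.List.sorted
      (((((PySem.List.enumerate t 0).foldl frb_posStep PySem.Dict.empty).items.filter
            (fun q => q.1 != ' ' && decide (2 ≤ q.2.length))).map
          (fun q => PySem.List.pyGetD q.2 1 0)))
      (fun x => x)).map (fun i => (PySem.List.pyGet? t i).getD ' ')

def first_recursive_char_alt (n : String) : List String :=
  (frb_core n.toList).map (fun c => String.ofList [c])

-- ===== PRECONDITION & SPEC =====
def Spec_first_recursive_char (n : String) (out : List String) : Prop := out = first_recursive_char_alt n
instance (n : String) (out : List String) : Decidable (Spec_first_recursive_char n out) := by unfold Spec_first_recursive_char; infer_instance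

-- ===== CLAIM =====
def Claim_equal_first_recursive_char : Prop := ∀ (n : String), Dom_first_recursive_char n → Spec_first_recursive_char n (first_recursive_char n)

-- ===== LEMMAS AND PROOFS =====

-- the positions (as Ints) at which c occurs in t, in increasing order
def posList (t : List Char) (c : Char) : List Int :=
  ((PySem.List.enumerate t 0).filter (fun p => p.2 == c)).map (·.1)

-- the filter and the map B applies to the items of the position index
def predB (t : List Char) (c : Char) : Bool := c != ' ' && decide (2 ≤ (posList t c).length)

def fB (t : List Char) (c : Char) : Int := PySem.List.pyGetD (posList t c) 1 0

-- the list of second-occurrence positions B sorts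
def LB (t : List Char) : List Int := ((PySem.Set.ofList t).filter (predB t)).map (fB t)

lemma posList_append (t : List Char) (a c : Char) :
    posList (t ++ [a]) c = posList t c ++ (if a = c then [(t.length : Int)] else []) := by
  unfold posList
  rw [PySem.List.enumerate_append, List.filter_append, List.map_append]
  congr 1
  rw [PySem.List.enumerate_cons, PySem.List.enumerate_nil, List.filter_singleton]
  by_cases h : a = c
  · subst h; simp
  · have hb : (a == c) = false := by simp [h]
    rw [hb, Bool.cond_false]
    simp [h]

lemma length_posList (t : List Char) (c : Char) : (posList t c).length = t.count c := by
  induction t using List.reverseRecOn with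
  | nil => rfl
  | append_singleton t a ih =>
    rw [posList_append, List.length_append, ih, List.count_append, List.count_singleton]
    by_cases h : a = c
    · subst h; simp
    · simp [beq_iff_eq, h]

lemma mem_posList (t : List Char) (c : Char) (i : Int) (h : i ∈ posList t c) :
    0 ≤ i ∧ i < t.length ∧ t[i.toNat]? = some c := by
  unfold posList at h
  obtain ⟨p, hp, rfl⟩ := List.mem_map.mp h
  obtain ⟨hmem, hc⟩ := List.mem_filter.mp hp
  obtain ⟨k, hk, rfl⟩ := (PySem.List.mem_enumerate_iff t 0 p).mp hmem
  simp only [beq_iff_eq] at hc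
  refine ⟨by positivity, by simp [hk], ?_⟩
  simp [hc, List.getElem?_eq_getElem hk]

lemma fB_spec (t : List Char) (c : Char) (h : 2 ≤ (posList t c).length) :
    0 ≤ fB t c ∧ fB t c < t.length ∧ t[(fB t c).toNat]? = some c := by
  apply mem_posList
  apply PySem.List.pyGetD_mem
  simp only [PySem.Raise.InRange]
  omega

lemma LB_bound (t : List Char) (i : Int) (h : i ∈ LB t) : 0 ≤ i ∧ i < t.length := by
  obtain ⟨c, hc, rfl⟩ := List.mem_map.mp h
  have hp := (List.mem_filter.mp hc).2
  simp only [predB, Bool.and_eq_true, decide_eq_true_eq] at hp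
  exact ⟨(fB_spec t c hp.2).1, (fB_spec t c hp.2).2.1⟩

lemma LB_nodup (t : List Char) : (LB t).Nodup := by
  apply List.Nodup.map_on
  · intro x hx y hy hxy
    have hpx := (List.mem_filter.mp hx).2
    have hpy := (List.mem_filter.mp hy).2
    simp only [predB, Bool.and_eq_true, decide_eq_true_eq] at hpx hpy
    have h1 := (fB_spec t x hpx.2).2.2
    have h2 := (fB_spec t y hpy.2).2.2
    rw [hxy, h2] at h1
    exact ((Option.some.injEq _ _).mp h1).symm
  · exact (PySem.Set.nodup_ofList t).filter _

-- B's body evaluated against the position index: frb_core t is the sorted list of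
-- second-occurrence positions mapped through t
lemma frb_core_eq (t : List Char) :
    frb_core t = (PySem.List.sorted (LB t) (fun x => x)).map
      (fun i => (PySem.List.pyGet? t i).getD ' ') := by
  have hfold : (PySem.List.enumerate t 0).foldl frb_posStep PySem.Dict.empty =
      ((PySem.List.enumerate t 0).map (fun p => (p.2, p.1))).foldl
        (fun d p => d.modify p.1 [] (· ++ [p.2])) PySem.Dict.empty := by
    rw [List.foldl_map]; rfl
  have hkeys : ((PySem.List.enumerate t 0).foldl frb_posStep PySem.Dict.empty).keys
      = PySem.Set.ofList t := by
    show ((PySem.List.enumerate t 0).foldl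
        (fun d p => d.modify ((·.2 : Int × Char → Char) p) []
          ((fun (_ : PySem.Dict Char (List Int)) (p : Int × Char) (l : List Int) => l ++ [p.1]) d p))
        PySem.Dict.empty).keys = _
    rw [PySem.Dict.keys_foldl_modify_key]
    rw [PySem.List.map_snd_enumerate]
    show PySem.Set.update PySem.Set.empty t = _
    exact PySem.Set.update_empty t
  have hnodup : ((PySem.List.enumerate t 0).foldl frb_posStep PySem.Dict.empty).keys.Nodup := by
    rw [hkeys]; exact PySem.Set.nodup_ofList t
  have hgetD : ∀ c, ((PySem.List.enumerate t 0).foldl frb_posStep PySem.Dict.empty).getD c []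
      = posList t c := by
    intro c
    rw [hfold, PySem.Dict.getD_foldl_modify_append]
    simp [posList, List.filter_map, List.map_map, Function.comp_def, PySem.Dict.getD_empty]
  have hitems : ((PySem.List.enumerate t 0).foldl frb_posStep PySem.Dict.empty).items
      = (PySem.Set.ofList t).map (fun c => (c, posList t c)) := by
    rw [PySem.Dict.items_eq_map_keys _ hnodup [], hkeys]
    exact List.map_congr_left (fun c _ => by rw [hgetD])
  unfold frb_core LB
  rw [hitems, List.filter_map, List.map_map]
  rfl

lemma pyGet_stable (t : List Char) (a : Char) (i : Int) (h0 : 0 ≤ i) (h1 : i < t.length) :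
    (PySem.List.pyGet? (t ++ [a]) i).getD ' ' = (PySem.List.pyGet? t i).getD ' ' := by
  rw [PySem.List.pyGet?_of_nonneg _ h0, PySem.List.pyGet?_of_nonneg _ h0,
    List.getElem?_append_left (by omega)]

lemma map_get_stable (t : List Char) (a : Char) (xs : List Int)
    (h : ∀ i ∈ xs, 0 ≤ i ∧ i < t.length) :
    xs.map (fun i => (PySem.List.pyGet? (t ++ [a]) i).getD ' ')
      = xs.map (fun i => (PySem.List.pyGet? t i).getD ' ') := by
  apply List.map_congr_left
  intro i hi
  exact pyGet_stable t a i (h i hi).1 (h i hi).2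

-- fB is unchanged by appending a character, for any c already occurring twice
lemma fB_append_of_two (t : List Char) (a c : Char) (h : 2 ≤ (posList t c).length) :
    fB (t ++ [a]) c = fB t c := by
  unfold fB
  rw [posList_append]
  by_cases hca : a = c
  · rw [if_pos hca]
    rw [PySem.List.pyGetD_ofNat', PySem.List.pyGetD_ofNat']
    rw [List.getD_eq_getElem?_getD, List.getD_eq_getElem?_getD,
      List.getElem?_append_left (Nat.lt_of_lt_of_le Nat.one_lt_two h)]
  · rw [if_neg hca, List.append_nil]

lemma fB_append_of_ne (t : List Char) (a c : Char) (hca : a ≠ c) :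
    fB (t ++ [a]) c = fB t c := by
  unfold fB
  rw [posList_append, if_neg hca, List.append_nil]

-- no-emit cases: appending a char that is not a second non-space occurrence leaves LB unchanged
lemma LB_append_same (t : List Char) (a : Char) (h : ¬ (t.count a = 1 ∧ a ≠ ' ')) :
    LB (t ++ [a]) = LB t := by
  have hpred : ∀ c, c ∈ t → predB (t ++ [a]) c = predB t c := by
    intro c hct
    unfold predB
    rw [posList_append, List.length_append]
    by_cases hca : a = c
    · subst hca
      have hcnt : 1 ≤ t.count a := List.count_pos_iff.mpr hct
      rw [if_pos rfl]
      by_cases hsp : a = ' '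
      · simp [hsp]
      · have h2 : 2 ≤ t.count a := by
          rcases Nat.eq_or_lt_of_le hcnt with h' | h'
          · exact absurd ⟨h'.symm, hsp⟩ h
          · omega
        have h3 : 2 ≤ t.count a + 1 := by omega
        simp [length_posList, h2, h3]
    · rw [if_neg hca]
      simp
  unfold LB
  by_cases hat : a ∈ t
  · rw [PySem.Set.ofList_append_singleton, PySem.Set.add_of_mem ((PySem.Set.mem_ofList t a).mpr hat)]
    rw [List.filter_congr (fun c hc => hpred c ((PySem.Set.mem_ofList t c).mp hc))]
    apply List.map_congr_left
    intro c hc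
    obtain ⟨hcS, hcp⟩ := List.mem_filter.mp hc
    simp only [predB, Bool.and_eq_true, decide_eq_true_eq] at hcp
    by_cases hca : a = c
    · exact fB_append_of_two t a c (hca ▸ hcp.2)
    · exact fB_append_of_ne t a c hca
  · have hcnt0 : t.count a = 0 := List.count_eq_zero.mpr hat
    rw [PySem.Set.ofList_append_singleton,
      PySem.Set.add_of_not_mem (fun hm => hat ((PySem.Set.mem_ofList t a).mp hm))]
    rw [List.filter_append]
    have hpa : predB (t ++ [a]) a = false := by
      unfold predB
      rw [posList_append, if_pos rfl, List.length_append, length_posList, hcnt0]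
      simp
    rw [List.filter_singleton]
    simp only [hpa, Bool.cond_false, List.append_nil]
    rw [List.filter_congr (fun c hc => hpred c ((PySem.Set.mem_ofList t c).mp hc))]
    apply List.map_congr_left
    intro c hc
    obtain ⟨hcS, hcp⟩ := List.mem_filter.mp hc
    have hca : a ≠ c := fun he => hat (he ▸ (PySem.Set.mem_ofList t c).mp hcS)
    exact fB_append_of_ne t a c hca

-- emit case: the new second occurrence position t.length joins LB, and being the
-- largest it lands at the end of the sorted order
lemma sorted_LB_append_emit (t : List Char) (a : Char) (h1 : t.count a = 1) (hsp : a ≠ ' ') :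
    PySem.List.sorted (LB (t ++ [a])) (fun x => x)
      = PySem.List.sorted (LB t) (fun x => x) ++ [(t.length : Int)] := by
  have hat : a ∈ t := List.count_pos_iff.mp (by omega)
  have hS : PySem.Set.ofList (t ++ [a]) = PySem.Set.ofList t := by
    rw [PySem.Set.ofList_append_singleton, PySem.Set.add_of_mem ((PySem.Set.mem_ofList t a).mpr hat)]
  have hpa' : predB (t ++ [a]) a = true := by
    unfold predB
    rw [posList_append, if_pos rfl, List.length_append, length_posList, h1]
    simp [hsp]
  have hpa : predB t a = false := by
    unfold predB
    rw [length_posList, h1]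
    simp
  have hpred : ∀ c, c ≠ a → predB (t ++ [a]) c = predB t c := by
    intro c hca
    unfold predB
    rw [posList_append, if_neg (fun he => hca he.symm), List.append_nil]
  -- the filtered key list is a permutation of the old one with a appended
  have hperm : ((PySem.Set.ofList t).filter (predB (t ++ [a]))).Perm
      (((PySem.Set.ofList t).filter (predB t)) ++ [a]) := by
    rw [List.perm_ext_iff_of_nodup ((PySem.Set.nodup_ofList t).filter _)]
    · intro c
      simp only [List.mem_filter, List.mem_append, List.mem_singleton]
      by_cases hca : c = a
      · subst hca
        simp [hpa', (PySem.Set.mem_ofList t c).mpr hat, hpa]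
      · rw [hpred c hca]
        simp [hca]
    · rw [List.nodup_append]
      refine ⟨(PySem.Set.nodup_ofList t).filter _, List.nodup_singleton a, ?_⟩
      intro x hx y hy
      rw [List.mem_singleton] at hy
      subst hy
      intro hxa
      rw [hxa] at hx
      have := (List.mem_filter.mp hx).2
      rw [hpa] at this
      exact absurd this (by simp)
  have hfBa : fB (t ++ [a]) a = (t.length : Int) := by
    unfold fB
    rw [posList_append, if_pos rfl]
    have hlen : (posList t a).length = 1 := by rw [length_posList, h1]
    obtain ⟨i0, hi0⟩ := List.length_eq_one_iff.mp hlen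
    rw [hi0]
    simp [PySem.List.pyGetD_ofNat']
  -- LB (t ++ [a]) is a permutation of LB t ++ [t.length]
  have hmapeq : ((((PySem.Set.ofList t).filter (predB t)) ++ [a]).map (fB (t ++ [a])))
      = (((PySem.Set.ofList t).filter (predB t)).map (fB t)) ++ [(t.length : Int)] := by
    rw [List.map_append, List.map_singleton, hfBa]
    congr 1
    apply List.map_congr_left
    intro c hc
    obtain ⟨hcS, hcp⟩ := List.mem_filter.mp hc
    simp only [predB, Bool.and_eq_true, decide_eq_true_eq] at hcp
    by_cases hca : a = c
    · exact fB_append_of_two t a c (hca ▸ hcp.2)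
    · exact fB_append_of_ne t a c hca
  have hLBperm : (LB (t ++ [a])).Perm (LB t ++ [(t.length : Int)]) := by
    unfold LB
    rw [hS, ← hmapeq]
    exact hperm.map _
  apply PySem.List.sorted_eq_of_perm_of_pairwise_lt
  · exact ((PySem.List.sorted_perm _ _ _).append_right _).trans hLBperm.symm
  · rw [List.pairwise_append]
    refine ⟨?_, List.pairwise_singleton _ _, ?_⟩
    · have hle := PySem.List.sorted_pairwise (LB t) (fun x => x)
      have hnd : (PySem.List.sorted (LB t) (fun x => x)).Nodup :=
        (PySem.List.sorted_perm _ _ _).nodup_iff.mpr (LB_nodup t)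
      exact (hle.and hnd).imp (fun h => lt_of_le_of_ne h.1 h.2)
    · intro x hx y hy
      rw [List.mem_singleton] at hy
      subst hy
      exact (LB_bound t x ((PySem.List.mem_sorted _ _ _ x).mp hx)).2

-- invariant of A's loop: s holds the chars seen, k the non-space chars seen twice
lemma count_append_singleton (p : List Char) (a c : Char) :
    (p ++ [a]).count c = p.count c + (if a = c then 1 else 0) := by
  simp [List.count_append, List.count_singleton]

lemma fold_inv (p : List Char) :
    (∀ c, c ∈ (p.foldl fr_step ([], [])).1 ↔ c ∈ p) ∧
    (∀ c, c ∈ (p.foldl fr_step ([], [])).2 ↔ 2 ≤ p.count c ∧ c ≠ ' ') := by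
  induction p using List.reverseRecOn with
  | nil => simp
  | append_singleton p a ih =>
    obtain ⟨hs, hkm⟩ := ih
    rw [List.foldl_append]
    set st := p.foldl fr_step ([], []) with hst
    rw [List.foldl_cons, List.foldl_nil]
    unfold fr_step
    constructor
    · intro c
      split_ifs with h1 h2 ha <;>
        simp only [List.mem_append, List.mem_singleton, hs] <;>
        first
        | exact Iff.rfl
        | (have hap : a ∈ p := (hs a).mp h1
           exact ⟨fun h => Or.inl h, fun h => h.elim id (fun hc => hc ▸ hap)⟩)
    · intro c
      split_ifs with h1 h2 ha
      · rw [hkm a] at h2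
        show c ∈ st.2 ↔ _
        rw [hkm c, count_append_singleton]
        by_cases hca : a = c
        · subst hca; constructor
          · rintro ⟨h, hn⟩; exact ⟨by omega, hn⟩
          · rintro ⟨h, hn⟩; exact ⟨by omega, hn⟩
        · rw [if_neg hca, add_zero]
      · have hap : a ∈ p := (hs a).mp h1
        have hge : 1 ≤ p.count a := List.count_pos_iff.mpr hap
        rw [hkm a] at h2
        have hc1 : p.count a = 1 := by
          rcases Nat.lt_or_ge (p.count a) 2 with h | h
          · omega
          · exact absurd ⟨h, ha⟩ h2
        show c ∈ st.2 ++ [a] ↔ _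
        rw [List.mem_append, List.mem_singleton, hkm c, count_append_singleton]
        by_cases hca : a = c
        · subst hca
          rw [if_pos rfl]
          constructor
          · rintro (⟨h, hn⟩ | h) <;> exact ⟨by omega, ha⟩
          · intro _; exact Or.inr rfl
        · rw [if_neg hca, add_zero]
          constructor
          · rintro (h | rfl)
            · exact h
            · exact absurd rfl hca
          · exact fun h => Or.inl h
      · rw [not_not] at ha
        show c ∈ st.2 ↔ _
        rw [hkm c, count_append_singleton]
        by_cases hca : a = c
        · subst hca
          constructor
          · rintro ⟨_, hn⟩; exact absurd ha hn
          · rintro ⟨_, hn⟩; exact absurd ha hn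
        · rw [if_neg hca, add_zero]
      · have hap : a ∉ p := fun h => h1 ((hs a).mpr h)
        have h0 : p.count a = 0 := List.count_eq_zero.mpr hap
        show c ∈ st.2 ↔ _
        rw [hkm c, count_append_singleton]
        by_cases hca : a = c
        · subst hca
          rw [if_pos rfl]
          constructor
          · rintro ⟨h, hn⟩; exact ⟨by omega, hn⟩
          · rintro ⟨h, hn⟩; exact ⟨by omega, hn⟩
        · rw [if_neg hca, add_zero]

lemma sorted_LB_bound (t : List Char) (i : Int)
    (h : i ∈ PySem.List.sorted (LB t) (fun x => x)) : 0 ≤ i ∧ i < t.length :=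
  LB_bound t i ((PySem.List.mem_sorted _ _ _ i).mp h)

-- the two programs compute the same character list
lemma main_eq (t : List Char) : (t.foldl fr_step ([], [])).2 = frb_core t := by
  induction t using List.reverseRecOn with
  | nil => decide
  | append_singleton t a ih =>
    obtain ⟨hs, hkm⟩ := fold_inv t
    rw [List.foldl_append, List.foldl_cons, List.foldl_nil]
    set st := t.foldl fr_step ([], []) with hst
    rw [frb_core_eq]
    by_cases hemit : t.count a = 1 ∧ a ≠ ' '
    · -- second occurrence of a non-space char: both emit a
      obtain ⟨h1, hsp⟩ := hemit
      have hat : a ∈ t := List.count_pos_iff.mp (by omega)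
      have hin1 : a ∈ st.1 := (hs a).mpr hat
      have hnin2 : a ∉ st.2 := by
        rw [hkm a]; rintro ⟨h2, _⟩; omega
      have hstep : fr_step st a = (st.1, st.2 ++ [a]) := by
        unfold fr_step
        rw [if_pos hin1, if_pos hnin2, if_pos hsp]
      rw [hstep]
      show st.2 ++ [a] = _
      rw [sorted_LB_append_emit t a h1 hsp, List.map_append, List.map_singleton]
      rw [map_get_stable t a _ (fun i hi => sorted_LB_bound t i hi)]
      congr 1
      · rw [ih, frb_core_eq]
      · have : PySem.List.pyGet? (t ++ [a]) (t.length : Int) = some a := by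
          have := PySem.List.pyGet?_append_length t [] a
          simpa using this
        rw [this]
        rfl
    · -- any other char: neither emits
      have hLB := LB_append_same t a hemit
      have hstep : (fr_step st a).2 = st.2 := by
        unfold fr_step
        by_cases hin1 : a ∈ st.1
        · by_cases hin2 : a ∈ st.2
          · rw [if_pos hin1, if_neg (not_not_intro hin2)]
          · by_cases hsp : a = ' '
            · rw [if_pos hin1, if_pos hin2, if_neg (by simp [hsp])]
            · exfalso
              have hat : a ∈ t := (hs a).mp hin1
              have hge : 1 ≤ t.count a := List.count_pos_iff.mpr hat
              have hlt : t.count a < 2 := by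
                by_contra hh
                exact hin2 ((hkm a).mpr ⟨by omega, hsp⟩)
              exact hemit ⟨by omega, hsp⟩
        · rw [if_neg hin1]
      rw [hstep, hLB, map_get_stable t a _ (fun i hi => sorted_LB_bound t i hi), ih, frb_core_eq]

-- ===== VERDICT =====
theorem first_recursive_char_spec : Claim_equal_first_recursive_char := by
  intro n _
  unfold Spec_first_recursive_char first_recursive_char first_recursive_char_alt
  rw [main_eq n.toList]
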